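-- pv_equiv track=rewrite | github.com/afrenkai/Sonance | testing/inspect_heuristic_embeddings.py | find_subsequence_indices
-- ===== SOURCE A (Python) =====
-- from typing import Dict, List, Tuple
--
-- def find_subsequence_indices(sequence: List[str], subseq: List[str]) -> List[Tuple[int, int]]:
--     """
--     Find all (start, end_exclusive) index ranges where subseq appears in sequence.
--     """
--     if not sequence or not subseq or len(subseq) > len(sequence):
--         return []
--     matches: List[Tuple[int, int]] = []
--     first = subseq[0]
--     max_start = len(sequence) - len(subseq) + 1
--     for i in range(max_start):
--         if sequence[i] != first:
--             continue
--         if sequence[i : i + len(subseq)] == subseq: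
--             matches.append((i, i + len(subseq)))
--     return matches
-- ===== SOURCE B (Python) =====
-- from typing import List, Tuple
--
-- def find_subsequence_indices(sequence: List[str], subseq: List[str]) -> List[Tuple[int, int]]:
--     """
--     Find all (start, end_exclusive) index ranges where subseq appears in sequence,
--     by refining the list of candidate start positions one pattern offset at a time.
--     """
--     n, m = len(sequence), len(subseq)
--     if m == 0 or m > n:
--         return []
--     candidates = list(range(n - m + 1))
--     for j, tok in enumerate(subseq):
--         candidates = [i for i in candidates if sequence[i + j] == tok]
--     return [(i, i + m) for i in candidates]
-- ===== Notes on version B (the rewrite author's own statement) =====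
-- stated objective: alternative
-- what changed: A scans text start positions and compares each window (first-token shortcut plus slice equality); B instead iterates over pattern offsets, repeatedly filtering a maintained list of candidate start positions, then maps survivors to ranges.
import Mathlib
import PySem

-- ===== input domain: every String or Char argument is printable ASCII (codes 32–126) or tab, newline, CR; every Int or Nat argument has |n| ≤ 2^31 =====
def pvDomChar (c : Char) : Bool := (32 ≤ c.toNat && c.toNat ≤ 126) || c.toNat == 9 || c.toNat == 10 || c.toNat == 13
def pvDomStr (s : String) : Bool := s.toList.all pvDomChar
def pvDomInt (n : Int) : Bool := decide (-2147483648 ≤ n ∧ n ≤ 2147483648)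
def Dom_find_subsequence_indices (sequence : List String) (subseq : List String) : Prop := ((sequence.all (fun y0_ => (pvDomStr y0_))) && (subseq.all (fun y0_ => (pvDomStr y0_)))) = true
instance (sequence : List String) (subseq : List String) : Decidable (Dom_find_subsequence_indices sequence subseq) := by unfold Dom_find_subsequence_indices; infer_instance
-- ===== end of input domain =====

-- B replaces A's window scan (for each start, compare the whole slice) by candidate
-- refinement: one filtering pass per pattern offset over the surviving start positions
-- (objective: alternative — same worst-case cost, different traversal).

-- ===== PORT A =====
def find_subsequence_indices (sequence : List String) (subseq : List String) : List (Int × Int) :=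
  if sequence = [] ∨ subseq = [] ∨ (subseq.length : Int) > (sequence.length : Int) then []
  else
    let first := subseq.headI        -- subseq[0]; subseq ≠ [] here
    let m : Int := subseq.length
    let max_start : Int := (sequence.length : Int) - m + 1
    (PySem.List.pyRange 0 max_start 1).foldl
      (fun ms i =>
        if PySem.List.pyGetD sequence i "" ≠ first then ms
        else if PySem.List.slice sequence (some i) (some (i + m)) = subseq then
          ms ++ [(i, i + m)]
        else ms) []

-- ===== PORT B =====
def find_subsequence_indices_alt (sequence : List String) (subseq : List String) : List (Int × Int) :=
  let n : Int := sequence.length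
  let m : Int := subseq.length
  if m = 0 ∨ m > n then []
  else
    let final :=
      (PySem.List.enumerate subseq 0).foldl
        (fun cands (p : Int × String) =>
          cands.filter (fun i => PySem.List.pyGetD sequence (i + p.1) "" == p.2))
        (PySem.List.pyRange 0 (n - m + 1) 1)
    final.map (fun i => (i, i + m))

-- ===== PRECONDITION & SPEC =====
def Spec_find_subsequence_indices (sequence : List String) (subseq : List String) (out : List (Int × Int)) : Prop := out = find_subsequence_indices_alt sequence subseq
instance (sequence : List String) (subseq : List String) (out : List (Int × Int)) : Decidable (Spec_find_subsequence_indices sequence subseq out) := by unfold Spec_find_subsequence_indices; infer_instance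

-- ===== CLAIM (what is proved, stated in full; the proofs are below) =====
def Claim_equal_find_subsequence_indices : Prop := ∀ (sequence : List String) (subseq : List String), Dom_find_subsequence_indices sequence subseq → Spec_find_subsequence_indices sequence subseq (find_subsequence_indices sequence subseq)

-- ===== LEMMAS AND PROOFS =====

-- B's refinement loop is a single filter by the conjunction of all per-offset tests.
theorem pv_foldl_filter {α β : Type} (g : β → α → Bool) :
    ∀ (l : List β) (cands : List α),
      l.foldl (fun c p => c.filter (g p)) cands = cands.filter (fun i => l.all (fun p => g p i)) := by
  intro l
  induction l with
  | nil => intro cands; simp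
  | cons p l ih =>
    intro cands
    simp only [List.foldl_cons, ih, List.filter_filter, List.all_cons]
    exact List.filter_congr (fun a _ => by rw [Bool.and_comm])

-- the all-offsets test over `enumerate` equals a take/drop window comparison
theorem pv_all_enum : ∀ (sub seq : List String) (a s : Nat), a + s + sub.length ≤ seq.length →
    (((PySem.List.enumerate sub ((s : Nat) : Int)).all
        (fun p => PySem.List.pyGetD seq ((a : Int) + p.1) "" == p.2)) = true
      ↔ (seq.drop (a + s)).take sub.length = sub) := by
  intro sub
  induction sub with
  | nil => intro seq a s h; simp [PySem.List.enumerate_nil]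
  | cons x xs ih =>
    intro seq a s h
    have hlt : a + s < seq.length := by simp at h; omega
    have hcast : ((s : Int) + 1) = (((s + 1 : Nat)) : Int) := by push_cast; ring
    rw [PySem.List.enumerate_cons, List.all_cons, hcast]
    have hget : PySem.List.pyGetD seq ((a : Int) + (s : Int)) "" = seq[a + s]'hlt := by
      have : ((a : Int) + (s : Int)) = (((a + s : Nat)) : Int) := by push_cast; ring
      rw [this, PySem.List.pyGetD_natCast, List.getD_eq_getElem _ _ hlt]
    have hdrop : seq.drop (a + s) = seq[a + s]'hlt :: seq.drop (a + s + 1) :=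
      List.drop_eq_getElem_cons hlt
    rw [hdrop]
    simp only [List.length_cons, List.take_succ_cons, Bool.and_eq_true, hget]
    constructor
    · rintro ⟨h1, h2⟩
      have := (ih seq a (s + 1) (by simp at h; omega)).mp h2
      simp only [beq_iff_eq] at h1
      rw [h1]
      have ha : a + (s + 1) = a + s + 1 := by omega
      rw [ha] at this
      rw [this]
    · intro hh
      injection hh with h1 h2
      constructor
      · simp [h1]
      · apply (ih seq a (s + 1) (by simp at h ⊢; omega)).mpr
        have ha : a + (s + 1) = a + s + 1 := by omega
        rw [ha]; exact h2

-- pointwise: A's slice test equals B's all-offsets test, for in-range starts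
theorem pv_pointwise (sequence subseq : List String) (a : Nat)
    (hle : a + subseq.length ≤ sequence.length) :
    (PySem.List.slice sequence (some (a : Int)) (some ((a : Int) + (subseq.length : Int))) = subseq)
      ↔ ((PySem.List.enumerate subseq 0).all
          (fun p => PySem.List.pyGetD sequence ((a : Int) + p.1) "" == p.2)) = true := by
  rw [PySem.List.slice_natCast_add]
  have h0 : (0 : Int) = ((0 : Nat) : Int) := by norm_num
  rw [h0, pv_all_enum subseq sequence a 0 (by omega)]
  rw [Nat.add_zero]

-- A's first-token shortcut is redundant whenever the slice matches
theorem pv_first (sequence subseq : List String) (a : Nat)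
    (hm : 0 < subseq.length) (hle : a + subseq.length ≤ sequence.length)
    (h : PySem.List.slice sequence (some (a : Int)) (some ((a : Int) + (subseq.length : Int))) = subseq) :
    PySem.List.pyGetD sequence (a : Int) "" = subseq.headI := by
  have hlt : a < sequence.length := by omega
  rw [PySem.List.slice_natCast_add] at h
  rw [PySem.List.pyGetD_natCast, List.getD_eq_getElem _ _ hlt]
  have hdrop : sequence.drop a = sequence[a]'hlt :: sequence.drop (a + 1) :=
    List.drop_eq_getElem_cons hlt
  rw [hdrop] at h
  cases subseq with
  | nil => simp at hm
  | cons y ys =>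
    rw [List.length_cons, List.take_succ_cons] at h
    have h1 := (List.cons.inj h).1
    simp [h1]

-- ===== VERDICT (by name: the statement is the Claim_ definition above) =====
theorem find_subsequence_indices_spec : Claim_equal_find_subsequence_indices := by
  intro sequence subseq _
  unfold Spec_find_subsequence_indices find_subsequence_indices find_subsequence_indices_alt
  by_cases hA : sequence = [] ∨ subseq = [] ∨ (subseq.length : Int) > (sequence.length : Int)
  · rw [if_pos hA, if_pos ?_]
    rcases hA with h | h | h
    · rcases subseq with _ | ⟨x, xs⟩
      · left; simp
      · right; simp [h]
    · left; simp [h]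
    · right; exact h
  · push_neg at hA
    obtain ⟨hseq, hsub, hmn⟩ := hA
    have hm : 0 < subseq.length := List.length_pos_iff.mpr hsub
    rw [if_neg (by push_neg; exact ⟨hseq, hsub, hmn⟩),
        if_neg (by push_neg; constructor <;> omega)]
    dsimp only
    rw [pv_foldl_filter]
    have hcong : (PySem.List.pyRange 0 ((sequence.length : Int) - (subseq.length : Int) + 1) 1).foldl
        (fun ms i => if PySem.List.pyGetD sequence i "" ≠ subseq.headI then ms
          else if PySem.List.slice sequence (some i) (some (i + (subseq.length : Int))) = subseq
            then ms ++ [(i, i + (subseq.length : Int))] else ms) []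
      = (PySem.List.pyRange 0 ((sequence.length : Int) - (subseq.length : Int) + 1) 1).foldl
        (fun ms i => if (PySem.List.slice sequence (some i) (some (i + (subseq.length : Int))) == subseq)
          then ms ++ [(i, i + (subseq.length : Int))] else ms) [] := by
      apply PySem.List.foldl_congr_mem
      intro ms i hi
      rw [PySem.List.mem_pyRange_one] at hi
      obtain ⟨h0, hlt⟩ := hi
      obtain ⟨a, rfl⟩ : ∃ a : Nat, i = (a : Int) := ⟨i.toNat, (Int.toNat_of_nonneg h0).symm⟩
      have hle : a + subseq.length ≤ sequence.length := by omega
      by_cases hs : PySem.List.slice sequence (some (a : Int)) (some ((a : Int) + (subseq.length : Int))) = subseq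
      · have hf := pv_first sequence subseq a hm hle hs
        simp [hs, hf]
      · simp [hs]
    rw [hcong, PySem.List.foldl_append_if, List.nil_append]
    congr 1
    apply List.filter_congr
    intro i hi
    rw [PySem.List.mem_pyRange_one] at hi
    obtain ⟨h0, hlt⟩ := hi
    obtain ⟨a, rfl⟩ : ∃ a : Nat, i = (a : Int) := ⟨i.toNat, (Int.toNat_of_nonneg h0).symm⟩
    have hle : a + subseq.length ≤ sequence.length := by omega
    have hpt := pv_pointwise sequence subseq a hle
    rw [Bool.eq_iff_iff]
    simp only [beq_iff_eq]
    exact hpt
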